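-- pv_equiv track=rewrite | github.com/ydb-platform/ydb | build/plugins/_common.py | filter_out_by_keyword
-- ===== SOURCE A (Python) =====
-- def filter_out_by_keyword(test_data, keyword):
--     def _iterate():
--         i = 0
--         while i < len(test_data):
--             if test_data[i] == keyword:
--                 i += 2
--             else:
--                 yield test_data[i]
--                 i += 1
--
--     return list(_iterate())
-- ===== SOURCE B (Python) =====
-- def filter_out_by_keyword(test_data, keyword):
--     result = []
--     skip_next = False
--     for x in test_data:
--         if skip_next:
--             skip_next = False
--         elif x == keyword:
--             skip_next = True
--         else:
--             result.append(x)
--     return result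
-- ===== Notes on version B (the rewrite author's own statement) =====
-- stated objective: simpler
-- what changed: Replaces the index-based while loop with i += 2 jumps (and a generator) by a single direct pass over the elements maintaining a skip_next flag.
import Mathlib
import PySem

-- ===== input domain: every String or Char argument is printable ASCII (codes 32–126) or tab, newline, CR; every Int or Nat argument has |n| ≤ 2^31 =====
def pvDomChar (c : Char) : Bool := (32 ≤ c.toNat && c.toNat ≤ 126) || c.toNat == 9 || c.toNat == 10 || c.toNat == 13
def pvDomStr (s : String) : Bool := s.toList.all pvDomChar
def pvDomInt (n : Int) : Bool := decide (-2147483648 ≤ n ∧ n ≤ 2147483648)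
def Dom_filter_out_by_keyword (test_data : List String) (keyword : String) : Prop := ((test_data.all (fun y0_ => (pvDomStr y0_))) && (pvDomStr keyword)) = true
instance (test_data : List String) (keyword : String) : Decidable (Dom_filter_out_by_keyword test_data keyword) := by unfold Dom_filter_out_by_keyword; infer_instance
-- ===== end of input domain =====

-- B replaces A's index-jumping while loop (i += 2 on keyword match, via a generator) with a single pass maintaining a skip_next flag; objective: simpler.


-- ===== PORT A =====
-- A: while-loop over an index i, skipping two positions when test_data[i] == keyword.
-- fuel-based transliteration of the while loop; fuel = len test_data suffices since i grows by ≥ 1 each step.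
def goA (test_data : List String) (keyword : String) : Nat → Nat → List String
  | 0, _ => []
  | fuel + 1, i =>
    if h : i < test_data.length then
      if test_data[i] = keyword then
        goA test_data keyword fuel (i + 2)
      else
        test_data[i] :: goA test_data keyword fuel (i + 1)
    else []

def filter_out_by_keyword (test_data : List String) (keyword : String) : List String :=
  goA test_data keyword test_data.length 0

-- ===== PORT B =====
-- B: one pass with a skip_next flag.
def goB (keyword : String) : List String → Bool → List String
  | [], _ => []
  | _ :: xs, true => goB keyword xs false
  | x :: xs, false =>
    if x = keyword then goB keyword xs true else x :: goB keyword xs false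

def filter_out_by_keyword_alt (test_data : List String) (keyword : String) : List String :=
  goB keyword test_data false

-- ===== PRECONDITION & SPEC =====
def Spec_filter_out_by_keyword (test_data : List String) (keyword : String) (out : List String) : Prop := out = filter_out_by_keyword_alt test_data keyword
instance (test_data : List String) (keyword : String) (out : List String) : Decidable (Spec_filter_out_by_keyword test_data keyword out) := by unfold Spec_filter_out_by_keyword; infer_instance

-- ===== CLAIM (what is proved, stated in full; the proofs are below) =====
def Claim_equal_filter_out_by_keyword : Prop := ∀ (test_data : List String) (keyword : String), Dom_filter_out_by_keyword test_data keyword → Spec_filter_out_by_keyword test_data keyword (filter_out_by_keyword test_data keyword)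

-- ===== LEMMAS AND PROOFS =====

-- ===== VERDICT (by name: the statement is the Claim_ definition above) =====
lemma goB_true (keyword : String) (xs : List String) :
    goB keyword xs true = goB keyword xs.tail false := by
  cases xs <;> simp [goB]

lemma goA_eq_goB (test_data : List String) (keyword : String) :
    ∀ fuel i, test_data.length - i ≤ fuel →
      goA test_data keyword fuel i = goB keyword (test_data.drop i) false := by
  intro fuel
  induction fuel with
  | zero =>
    intro i h
    have : test_data.length ≤ i := by omega
    simp [goA, List.drop_eq_nil_of_le this, goB]
  | succ fuel ih =>
    intro i h
    by_cases hi : i < test_data.length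
    · have hdrop : test_data.drop i = test_data[i] :: test_data.drop (i + 1) :=
        List.drop_eq_getElem_cons hi
      by_cases hk : test_data[i] = keyword
      · have h2 : test_data.length - (i + 2) ≤ fuel := by omega
        rw [show goA test_data keyword (fuel + 1) i
              = goA test_data keyword fuel (i + 2) by simp [goA, hi, hk]]
        rw [ih (i + 2) h2, hdrop]
        simp [goB, hk, goB_true, List.tail_drop]
      · have h1 : test_data.length - (i + 1) ≤ fuel := by omega
        rw [show goA test_data keyword (fuel + 1) i
              = test_data[i] :: goA test_data keyword fuel (i + 1) by simp [goA, hi, hk]]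
        rw [ih (i + 1) h1, hdrop]
        simp [goB, hk]
    · have : test_data.length ≤ i := by omega
      simp [goA, hi, List.drop_eq_nil_of_le this, goB]

-- ===== VERDICT (by name: the statement is the Claim_ definition above) =====
theorem filter_out_by_keyword_spec : Claim_equal_filter_out_by_keyword := by
  intro test_data keyword _
  unfold Spec_filter_out_by_keyword filter_out_by_keyword filter_out_by_keyword_alt
  simpa using goA_eq_goB test_data keyword test_data.length 0 (by omega)
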